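-- pv_equiv track=rewrite | github.com/SimonRamos88/Programacion-Basica | Ejercicios_BINARIOS_SimonRamos.py | inyectiva
-- ===== SOURCE A (Python) =====
-- def sumafil(A,k):
--   m = len(A[0])
--   suma = 0
--   for j in range(m):
--     suma += A[k][j]
--   return suma
--
-- def sumacol(A,k):
--   n = len(A)
--   suma = 0
--   for i in range(n):
--     suma += A[i][k]
--   return suma
--
-- def inyectiva(A):
--   n = len(A)
--   m = len(A[0])
--   i = 0
--   while i < n and sumafil(A,i) <= 1:
--     i += 1
--   j = 0
--   if i == n:
--     while j < m and sumacol(A,j) <= 1: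
--       j += 1
--   return j == m
-- ===== SOURCE B (Python) =====
-- def inyectiva(A):
--     n = len(A)
--     m = len(A[0])
--     row_sums = [0] * n
--     col_sums = [0] * m
--     for i in range(n):
--         for j in range(m):
--             x = A[i][j]
--             row_sums[i] += x
--             col_sums[j] += x
--     return all(s <= 1 for s in row_sums) and all(s <= 1 for s in col_sums)
-- ===== Notes on version B (the rewrite author's own statement) =====
-- stated objective: alternative
-- what changed: Replaced A's two early-exit while-loop scans (each calling a per-row/per-column summing helper) by a single accumulation pass that builds row_sums and col_sums tables, followed by two flat all(...) checks.
-- outside the precondition, e.g. on inyectiva([[2], []]): A returns False, B raises IndexError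
import Mathlib
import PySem

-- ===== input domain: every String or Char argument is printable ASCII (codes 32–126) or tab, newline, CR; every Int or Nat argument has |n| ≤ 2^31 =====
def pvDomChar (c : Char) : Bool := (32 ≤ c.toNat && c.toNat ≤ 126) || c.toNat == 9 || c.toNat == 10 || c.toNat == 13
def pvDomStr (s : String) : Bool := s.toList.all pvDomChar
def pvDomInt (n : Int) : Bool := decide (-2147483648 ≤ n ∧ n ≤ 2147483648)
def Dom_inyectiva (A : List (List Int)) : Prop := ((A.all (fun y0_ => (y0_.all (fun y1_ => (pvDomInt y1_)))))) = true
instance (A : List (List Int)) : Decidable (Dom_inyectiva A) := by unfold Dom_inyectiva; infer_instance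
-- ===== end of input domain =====

-- B replaces A's two early-exit while-loop scans by a single accumulation pass building the
-- row-sum and column-sum tables, followed by two flat checks (alternative decomposition).

-- ===== PORT A =====
-- Python indexing A[k][j] is ported as getD; exact for the in-range indices the loops produce
-- (Pre_ excludes empty A and matrices with a row shorter than A[0], where Python raises).
def sumafilL (A : List (List Int)) (k : Nat) : Int :=
  (List.range (A.headD []).length).foldl (fun suma j => suma + (A.getD k []).getD j 0) 0

def sumacolL (A : List (List Int)) (k : Nat) : Int :=
  (List.range A.length).foldl (fun suma i => suma + (A.getD i []).getD k 0) 0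

def whileRow (A : List (List Int)) (n i : Nat) : Nat :=
  if h : i < n then
    if sumafilL A i ≤ 1 then whileRow A n (i + 1) else i
  else i
termination_by n - i

def whileCol (A : List (List Int)) (m j : Nat) : Nat :=
  if h : j < m then
    if sumacolL A j ≤ 1 then whileCol A m (j + 1) else j
  else j
termination_by m - j

def inyectiva (A : List (List Int)) : Bool :=
  let n := A.length
  let m := (A.headD []).length   -- len(A[0]); Pre_ excludes A = []
  let i := whileRow A n 0
  let j := if i = n then whileCol A m 0 else 0
  decide (j = m)

-- ===== PORT B =====
def inyectiva_alt (A : List (List Int)) : Bool :=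
  let n := A.length
  let m := (A.headD []).length
  let p := (List.range n).foldl (fun (p : List Int × List Int) i =>
      (List.range m).foldl (fun (q : List Int × List Int) j =>
        (q.1.set i (q.1.getD i 0 + (A.getD i []).getD j 0),
         q.2.set j (q.2.getD j 0 + (A.getD i []).getD j 0))) p)
    (List.replicate n 0, List.replicate m 0)
  p.1.all (fun s => s ≤ 1) && p.2.all (fun s => s ≤ 1)

-- ===== PRECONDITION & SPEC =====
-- Pre_ excludes empty A (Python A raises IndexError on len(A[0])) and matrices with a row
-- shorter than the first row, where B's full pass raises IndexError while A may return early.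
def Pre_inyectiva (A : List (List Int)) : Prop :=
  A ≠ [] ∧ ∀ row ∈ A, (A.headD []).length ≤ row.length
instance (A : List (List Int)) : Decidable (Pre_inyectiva A) := by unfold Pre_inyectiva; infer_instance

def pvWitness_inyectiva : List (List Int) := [[1, 0], [0, 1]]

def Spec_inyectiva (A : List (List Int)) (out : Bool) : Prop := out = inyectiva_alt A
instance (A : List (List Int)) (out : Bool) : Decidable (Spec_inyectiva A out) := by unfold Spec_inyectiva; infer_instance

-- ===== CLAIM (what is proved, stated in full; the proofs are below) =====
def Claim_equal_inyectiva : Prop := ∀ (A : List (List Int)), Dom_inyectiva A → Pre_inyectiva A → Spec_inyectiva A (inyectiva A)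

-- ===== LEMMAS AND PROOFS =====

theorem foldl_add_sum (y : Nat → Int) : ∀ (js : List Nat) (a : Int),
    js.foldl (fun s j => s + y j) a = a + (js.map y).sum := by
  intro js
  induction js with
  | nil => simp
  | cons j js ih => intro a; simp only [List.foldl_cons, List.map_cons, List.sum_cons, ih]; ring

theorem pair_foldl (f1 f2 : List Int → Nat → List Int) : ∀ (js : List Nat) (q : List Int × List Int),
    js.foldl (fun q j => (f1 q.1 j, f2 q.2 j)) q = (js.foldl f1 q.1, js.foldl f2 q.2) := by
  intro js
  induction js with
  | nil => intro q; rfl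
  | cons j js ih => intro q; simp only [List.foldl_cons, ih]

theorem foldl_len {f : List Int → Nat → List Int} (hf : ∀ r j, (f r j).length = r.length) :
    ∀ (js : List Nat) (r : List Int), (js.foldl f r).length = r.length := by
  intro js
  induction js with
  | nil => intro r; rfl
  | cons j js ih => intro r; rw [List.foldl_cons, ih, hf]

theorem foldl_congr_len (n : Nat) {f g : List Int → Nat → List Int}
    (hg : ∀ r j, (g r j).length = r.length) :
    ∀ (js : List Nat), (∀ r j, r.length = n → j ∈ js → f r j = g r j) →
    ∀ (r : List Int), r.length = n → js.foldl f r = js.foldl g r := by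
  intro js
  induction js with
  | nil => intro _ r _; rfl
  | cons j js ih =>
    intro hfg r hr
    rw [List.foldl_cons, List.foldl_cons, hfg r j hr (by simp)]
    exact ih (fun r j hr hj => hfg r j hr (by simp [hj])) (g r j) (by rw [hg]; exact hr)

theorem foldl_set_const (i : Nat) (y : Nat → Int) : ∀ (js : List Nat) (r : List Int), i < r.length →
    js.foldl (fun r j => r.set i (r.getD i 0 + y j)) r = r.set i (r.getD i 0 + (js.map y).sum) := by
  intro js
  induction js with
  | nil =>
    intro r h
    simp [List.getD, List.getElem?_eq_getElem h, List.set_getElem_self]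
  | cons j js ih =>
    intro r h
    rw [List.foldl_cons, ih _ (by simpa using h)]
    have h' : i < (r.set i (r.getD i 0 + y j)).length := by simpa using h
    rw [List.getD_eq_getElem _ _ h', List.getElem_set_self, List.set_set]
    rw [List.map_cons, List.sum_cons, List.getD_eq_getElem _ _ h]
    ring_nf

theorem foldl_set_distinct (y : Nat → Int) : ∀ (b a : Nat) (r : List Int), a + b ≤ r.length →
    ∀ (t : Nat), t < r.length →
    ((List.range' a b).foldl (fun r j => r.set j (r.getD j 0 + y j)) r).getD t 0
      = r.getD t 0 + (if a ≤ t ∧ t < a + b then y t else 0) := by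
  intro b
  induction b with
  | zero =>
    intro a r _ t ht
    have h0 : ¬ (a ≤ t ∧ t < a + 0) := by omega
    rw [List.range'_zero, List.foldl_nil, if_neg h0, add_zero]
  | succ b ih =>
    intro a r hb t ht
    rw [List.range'_succ, List.foldl_cons]
    rw [ih (a + 1) _ (by rw [List.length_set]; omega) t (by rw [List.length_set]; exact ht)]
    by_cases hta : t = a
    · subst hta
      rw [List.getD_eq_getElem _ _ (by rw [List.length_set]; exact ht), List.getElem_set_self]
      rw [List.getD_eq_getElem _ _ ht]
      have h1 : ¬ (t + 1 ≤ t ∧ t < t + 1 + b) := by omega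
      have h2 : t ≤ t ∧ t < t + (b + 1) := by omega
      rw [if_neg h1, if_pos h2]
      ring
    · rw [List.getD_eq_getElem _ _ (by rw [List.length_set]; exact ht), List.getElem_set_ne (by omega)]
      rw [List.getD_eq_getElem _ _ ht]
      by_cases h1 : a + 1 ≤ t ∧ t < a + 1 + b
      · have h2 : a ≤ t ∧ t < a + (b + 1) := by omega
        rw [if_pos h1, if_pos h2]
      · have h2 : ¬ (a ≤ t ∧ t < a + (b + 1)) := by omega
        rw [if_neg h1, if_neg h2]

theorem all_le_one_iff (l : List Int) : (l.all (fun s => s ≤ 1) = true) ↔ ∀ t, t < l.length → l.getD t 0 ≤ 1 := by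
  rw [List.all_eq_true]
  constructor
  · intro h t ht
    rw [List.getD_eq_getElem _ _ ht]
    simpa using h _ (List.getElem_mem ht)
  · intro h s hs
    obtain ⟨t, ht, rfl⟩ := List.mem_iff_getElem.mp hs
    have := h t ht
    rw [List.getD_eq_getElem _ _ ht] at this
    simpa using this

theorem whileRow_iff (A : List (List Int)) (n : Nat) : ∀ (d i : Nat), i ≤ n → n - i ≤ d →
    (whileRow A n i = n ↔ ∀ k, i ≤ k → k < n → sumafilL A k ≤ 1) := by
  intro d
  induction d with
  | zero =>
    intro i hi hd
    have hin : i = n := by omega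
    rw [whileRow, dif_neg (by omega : ¬ (i < n))]
    exact ⟨fun _ k h1 h2 => absurd h2 (by omega), fun _ => hin⟩
  | succ d ih =>
    intro i hi hd
    rw [whileRow]
    by_cases h : i < n
    · simp only [h, dite_true]
      by_cases hs : sumafilL A i ≤ 1
      · rw [if_pos hs, ih (i + 1) (by omega) (by omega)]
        constructor
        · intro hall k hk1 hk2
          by_cases hki : k = i
          · subst hki; exact hs
          · exact hall k (by omega) hk2
        · intro hall k hk1 hk2; exact hall k (by omega) hk2
      · rw [if_neg hs]
        exact ⟨fun hin => absurd hin (by omega), fun hall => absurd (hall i (by omega) h) hs⟩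
    · rw [dif_neg h]
      have hin : i = n := by omega
      exact ⟨fun _ k h1 h2 => absurd h2 (by omega), fun _ => hin⟩

theorem whileCol_iff (A : List (List Int)) (m : Nat) : ∀ (d j : Nat), j ≤ m → m - j ≤ d →
    (whileCol A m j = m ↔ ∀ k, j ≤ k → k < m → sumacolL A k ≤ 1) := by
  intro d
  induction d with
  | zero =>
    intro j hj hd
    have hjm : j = m := by omega
    rw [whileCol, dif_neg (by omega : ¬ (j < m))]
    exact ⟨fun _ k h1 h2 => absurd h2 (by omega), fun _ => hjm⟩
  | succ d ih =>
    intro j hj hd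
    rw [whileCol]
    by_cases h : j < m
    · simp only [h, dite_true]
      by_cases hs : sumacolL A j ≤ 1
      · rw [if_pos hs, ih (j + 1) (by omega) (by omega)]
        constructor
        · intro hall k hk1 hk2
          by_cases hkj : k = j
          · subst hkj; exact hs
          · exact hall k (by omega) hk2
        · intro hall k hk1 hk2; exact hall k (by omega) hk2
      · rw [if_neg hs]
        exact ⟨fun hjm => absurd hjm (by omega), fun hall => absurd (hall j (by omega) h) hs⟩
    · rw [dif_neg h]
      have hjm : j = m := by omega
      exact ⟨fun _ k h1 h2 => absurd h2 (by omega), fun _ => hjm⟩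

-- the cell value read by both programs
def cellX (A : List (List Int)) (i j : Nat) : Int := (A.getD i []).getD j 0

theorem sumafil_eq (A : List (List Int)) (i : Nat) :
    sumafilL A i = ((List.range (A.headD []).length).map (cellX A i)).sum := by
  unfold sumafilL cellX
  rw [foldl_add_sum (fun j => (A.getD i []).getD j 0)]
  simp

theorem sumacol_eq (A : List (List Int)) (j : Nat) :
    sumacolL A j = ((List.range A.length).map (fun i => cellX A i j)).sum := by
  unfold sumacolL cellX
  rw [foldl_add_sum (fun i => (A.getD i []).getD j 0)]
  simp

-- pointwise value of B's row-sums table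
theorem rs_getD (A : List (List Int)) (n m : Nat) (t : Nat) (ht : t < n) :
    ((List.range n).foldl (fun r i => (List.range m).foldl (fun r j => r.set i (r.getD i 0 + cellX A i j)) r) (List.replicate n 0)).getD t 0
      = ((List.range m).map (cellX A t)).sum := by
  rw [foldl_congr_len n (g := fun r i => r.set i (r.getD i 0 + ((List.range m).map (cellX A i)).sum))
      (fun r j => by simp) (List.range n)
      (fun r i hr hi => foldl_set_const i (cellX A i) (List.range m) r (by rw [hr]; simpa using hi))
      (List.replicate n 0) (by simp)]
  have hr : List.range n = List.range' 0 n := by simp [List.range_eq_range']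
  rw [hr]
  rw [foldl_set_distinct (fun i => ((List.range m).map (cellX A i)).sum) n 0 (List.replicate n 0) (by simp) t (by simpa using ht)]
  have h0 : 0 ≤ t ∧ t < 0 + n := by omega
  rw [if_pos h0]
  simp

-- pointwise value of B's column-sums table
theorem cs_foldl (A : List (List Int)) (m : Nat) : ∀ (is : List Nat) (c : List Int),
    c.length = m → ∀ t, t < m →
    ((is.foldl (fun c i => (List.range m).foldl (fun c j => c.set j (c.getD j 0 + cellX A i j)) c) c).getD t 0
      = c.getD t 0 + (is.map (fun i => cellX A i t)).sum) := by
  intro is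
  induction is with
  | nil => intro c _ t _; simp
  | cons i is ih =>
    intro c hc t ht
    rw [List.foldl_cons]
    have hlen : ((List.range m).foldl (fun c j => c.set j (c.getD j 0 + cellX A i j)) c).length = c.length :=
      foldl_len (fun r j => by simp) _ _
    rw [ih _ (by rw [hlen, hc]) t ht]
    have hr : List.range m = List.range' 0 m := by simp [List.range_eq_range']
    rw [hr]
    rw [foldl_set_distinct (fun j => cellX A i j) m 0 c (by omega) t (by omega)]
    have h0 : 0 ≤ t ∧ t < 0 + m := by omega
    rw [if_pos h0]
    simp only [List.map_cons, List.sum_cons]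
    ring

theorem cs_getD (A : List (List Int)) (n m : Nat) (t : Nat) (ht : t < m) :
    ((List.range n).foldl (fun c i => (List.range m).foldl (fun c j => c.set j (c.getD j 0 + cellX A i j)) c) (List.replicate m 0)).getD t 0
      = ((List.range n).map (fun i => cellX A i t)).sum := by
  rw [cs_foldl A m (List.range n) (List.replicate m 0) (by simp) t ht]
  simp

theorem ports_eq (A : List (List Int)) : inyectiva A = inyectiva_alt A := by
  simp only [inyectiva, inyectiva_alt]
  set n := A.length with hn
  set m := (A.headD []).length with hm
  -- split B's pair-fold into its two components
  have hF : (fun (p : List Int × List Int) i =>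
      (List.range m).foldl (fun (q : List Int × List Int) j =>
        (q.1.set i (q.1.getD i 0 + (A.getD i []).getD j 0),
         q.2.set j (q.2.getD j 0 + (A.getD i []).getD j 0))) p)
      = fun (p : List Int × List Int) i =>
        ((List.range m).foldl (fun r j => r.set i (r.getD i 0 + cellX A i j)) p.1,
         (List.range m).foldl (fun c j => c.set j (c.getD j 0 + cellX A i j)) p.2) := by
    funext p i
    exact pair_foldl (fun r j => r.set i (r.getD i 0 + cellX A i j))
      (fun c j => c.set j (c.getD j 0 + cellX A i j)) (List.range m) p
  rw [hF, pair_foldl (fun r i => (List.range m).foldl (fun r j => r.set i (r.getD i 0 + cellX A i j)) r)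
        (fun c i => (List.range m).foldl (fun c j => c.set j (c.getD j 0 + cellX A i j)) c)
        (List.range n) (List.replicate n 0, List.replicate m 0)]
  set RS := (List.range n).foldl (fun r i => (List.range m).foldl (fun r j => r.set i (r.getD i 0 + cellX A i j)) r) (List.replicate n 0) with hRS
  set CS := (List.range n).foldl (fun c i => (List.range m).foldl (fun c j => c.set j (c.getD j 0 + cellX A i j)) c) (List.replicate m 0) with hCS
  have hRSlen : RS.length = n := by
    rw [hRS, foldl_len (fun r i => foldl_len (fun r j => by simp) _ r) (List.range n) (List.replicate n 0)]
    simp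
  have hCSlen : CS.length = m := by
    rw [hCS, foldl_len (fun c i => foldl_len (fun c j => by simp) _ c) (List.range n) (List.replicate m 0)]
    simp
  have hRSall : (RS.all (fun s => s ≤ 1) = true) ↔ ∀ k, k < n → sumafilL A k ≤ 1 := by
    rw [all_le_one_iff]
    constructor
    · intro h k hk
      rw [sumafil_eq, ← hm, ← rs_getD A n m k hk, ← hRS]
      exact h k (by rw [hRSlen]; exact hk)
    · intro h t ht
      rw [hRSlen] at ht
      rw [hRS, rs_getD A n m t ht]
      have := h t ht
      rwa [sumafil_eq, ← hm] at this
  have hCSall : (CS.all (fun s => s ≤ 1) = true) ↔ ∀ k, k < m → sumacolL A k ≤ 1 := by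
    rw [all_le_one_iff]
    constructor
    · intro h k hk
      rw [sumacol_eq, ← hn, ← cs_getD A n m k hk, ← hCS]
      exact h k (by rw [hCSlen]; exact hk)
    · intro h t ht
      rw [hCSlen] at ht
      rw [hCS, cs_getD A n m t ht]
      have := h t ht
      rwa [sumacol_eq, ← hn] at this
  rw [Bool.eq_iff_iff]
  simp only [decide_eq_true_eq, Bool.and_eq_true]
  by_cases hrow : ∀ k, k < n → sumafilL A k ≤ 1
  · have hwr : whileRow A n 0 = n :=
      (whileRow_iff A n n 0 (Nat.zero_le n) (by omega)).mpr (fun k _ hk => hrow k hk)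
    rw [if_pos hwr]
    by_cases hcol : ∀ k, k < m → sumacolL A k ≤ 1
    · have hwc : whileCol A m 0 = m :=
        (whileCol_iff A m m 0 (Nat.zero_le m) (by omega)).mpr (fun k _ hk => hcol k hk)
      exact iff_of_true hwc ⟨hRSall.mpr hrow, hCSall.mpr hcol⟩
    · have hwc : whileCol A m 0 ≠ m := fun h =>
        hcol (fun k hk => (whileCol_iff A m m 0 (Nat.zero_le m) (by omega)).mp h k (Nat.zero_le k) hk)
      exact iff_of_false hwc (fun hp => hcol (hCSall.mp hp.2))
  · have hwr : whileRow A n 0 ≠ n := fun h =>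
      hrow (fun k hk => (whileRow_iff A n n 0 (Nat.zero_le n) (by omega)).mp h k (Nat.zero_le k) hk)
    rw [if_neg hwr]
    have hm0 : m ≠ 0 := by
      intro h0
      apply hrow
      intro k hk
      rw [sumafil_eq, ← hm, h0]
      simp
    exact iff_of_false (fun h => hm0 h.symm) (fun hp => hrow (hRSall.mp hp.1))

-- ===== VERDICT (by name: the statement is the Claim_ definition above) =====
theorem inyectiva_spec : Claim_equal_inyectiva := by
  intro A _ _
  unfold Spec_inyectiva
  exact ports_eq A
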